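-- pv_equiv track=rewrite | github.com/hosua/blackjack-cs241 | card_handler.py | m_aces
-- ===== SOURCE A (Python) =====
-- def m_aces(counter):
--     dupes = []
--     for key in counter.keys():
--         # if the count of the rank is greater than one
--         if counter[key] > 1:
--             # add it as a duplicate
--             dupes.append(key)
--     # If there are duplicate aces, return true
--     if 'Ace' in dupes:
--         return True
--     else:
--         return False
-- ===== SOURCE B (Python) =====
-- def m_aces(counter):
--     return counter.get('Ace', 0) > 1
-- ===== Notes on version B (the rewrite author's own statement) =====
-- stated objective: simpler
-- what changed: Replaces the scan over all keys that collects every duplicated rank into a list (only to test 'Ace' membership afterwards) with a single direct lookup of the 'Ace' count.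
import Mathlib
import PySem

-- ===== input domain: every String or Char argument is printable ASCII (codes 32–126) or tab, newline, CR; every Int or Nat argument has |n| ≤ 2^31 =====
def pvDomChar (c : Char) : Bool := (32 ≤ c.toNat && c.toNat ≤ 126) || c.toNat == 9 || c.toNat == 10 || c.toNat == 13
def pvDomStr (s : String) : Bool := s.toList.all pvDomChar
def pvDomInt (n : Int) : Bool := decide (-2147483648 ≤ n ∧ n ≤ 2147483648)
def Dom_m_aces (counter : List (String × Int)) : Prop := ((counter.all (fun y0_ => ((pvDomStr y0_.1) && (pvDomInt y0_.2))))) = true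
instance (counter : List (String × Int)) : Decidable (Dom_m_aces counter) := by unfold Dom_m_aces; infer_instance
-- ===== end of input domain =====

-- B replaces A's scan-and-collect over all keys by one direct lookup of the 'Ace' count (simpler).

-- ===== PORT A =====
-- A iterates over the dict's keys, collecting those with count > 1 into `dupes`,
-- then answers whether 'Ace' is among them.  counter[key] with key ∈ keys is a
-- guaranteed-present lookup, ported as getD _ 0 (exact: the key is present).
def m_aces (counter : List (String × Int)) : Bool :=
  let d := PySem.Dict.ofList counter
  let dupes := d.keys.foldl (fun acc k => if d.getD k 0 > 1 then acc ++ [k] else acc) []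
  if "Ace" ∈ dupes then true else false

-- ===== PORT B =====
def m_aces_alt (counter : List (String × Int)) : Bool :=
  decide ((PySem.Dict.ofList counter).getD "Ace" 0 > 1)

-- ===== PRECONDITION & SPEC =====
def Spec_m_aces (counter : List (String × Int)) (out : Bool) : Prop := out = m_aces_alt counter
instance (counter : List (String × Int)) (out : Bool) : Decidable (Spec_m_aces counter out) := by unfold Spec_m_aces; infer_instance

-- ===== CLAIM (what is proved, stated in full; the proofs are below) =====
def Claim_equal_m_aces : Prop := ∀ (counter : List (String × Int)), Dom_m_aces counter → Spec_m_aces counter (m_aces counter)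

-- ===== LEMMAS AND PROOFS =====

-- 'Ace' is collected into dupes iff its stored count exceeds 1
theorem m_aces_eq_alt (counter : List (String × Int)) :
    m_aces counter = m_aces_alt counter := by
  show (let d := PySem.Dict.ofList counter
    let dupes := d.keys.foldl (fun acc k => if d.getD k 0 > 1 then acc ++ [k] else acc) []
    if "Ace" ∈ dupes then true else false) =
    decide ((PySem.Dict.ofList counter).getD "Ace" 0 > 1)
  set d := PySem.Dict.ofList counter with hd
  simp only [PySem.List.foldl_append_ite_eq_filter]
  simp only [List.nil_append, List.mem_filter]
  by_cases hk : "Ace" ∈ d.keys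
  · simp [hk]
  · have hc : d.contains "Ace" = false := by
      rw [Bool.eq_false_iff]
      intro h
      exact hk ((PySem.Dict.contains_iff_mem_keys d "Ace").1 h)
    rw [PySem.Dict.getD_of_not_contains d (k := "Ace") 0 hc]
    simp [hk]

-- ===== VERDICT (by name: the statement is the Claim_ definition above) =====
theorem m_aces_spec : Claim_equal_m_aces := by
  intro counter _
  exact m_aces_eq_alt counter
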